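-- pv_equiv track=rewrite | github.com/vvchldmsdn/algorithms | nexon/2.py | check
-- ===== SOURCE A (Python) =====
-- def check(a, b):
--     a_idx = 0
--     b_idx = 0
--     result = 0
--
--     while result != len(b) and a_idx < len(a):
--         if a[a_idx] == '_':
--             a_idx += 1
--         else:
--             if a[a_idx] == b[b_idx]:
--                 result += 1
--                 a_idx += 1
--                 b_idx += 1
--             else:
--                 a_idx += 1
--
--     if result == len(b):
--         return True
--     else:
--         return False
-- ===== SOURCE B (Python) =====
-- def check(a, b):
--     # Back-to-front greedy: scan a in reverse, matching b from its last
--     # character down. Correct because subsequence-ness is preserved by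
--     # reversing both strings.
--     j = len(b) - 1
--     for c in reversed(a):
--         if j >= 0 and c != '_' and c == b[j]:
--             j -= 1
--     return j < 0
-- ===== Notes on version B (the rewrite author's own statement) =====
-- stated objective: alternative
-- what changed: B scans a in reverse and matches the characters of b back-to-front with a single descending index (no pointer into a), instead of A's forward two-pointer skip/match scan; correctness rests on the subsequence test being symmetric under reversal.
import Mathlib
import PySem

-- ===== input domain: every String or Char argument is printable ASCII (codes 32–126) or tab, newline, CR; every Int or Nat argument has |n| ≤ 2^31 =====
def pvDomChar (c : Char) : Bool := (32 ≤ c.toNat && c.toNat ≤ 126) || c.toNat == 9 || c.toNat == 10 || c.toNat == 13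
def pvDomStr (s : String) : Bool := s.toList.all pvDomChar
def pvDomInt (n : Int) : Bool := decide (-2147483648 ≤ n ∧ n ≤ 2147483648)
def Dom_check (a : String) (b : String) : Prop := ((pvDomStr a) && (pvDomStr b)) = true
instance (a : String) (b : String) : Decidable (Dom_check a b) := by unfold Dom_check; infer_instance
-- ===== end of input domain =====

-- B scans a in reverse, matching b back-to-front with one descending index
-- (alternative traversal; correct since subsequence-ness survives reversal).


-- ===== PORT A =====
-- the while loop: state (a_idx, b_idx, result); returns the final result.
-- in-range index accesses a[a_idx], b[b_idx] are rendered with getD (always in range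
-- when read: the loop guard gives a_idx < len a, and result = b_idx < len b).
def checkGo (as_ bs : List Char) (a_idx b_idx result : Nat) : Nat :=
  if h : result ≠ bs.length ∧ a_idx < as_.length then
    if as_.getD a_idx ' ' = '_' then
      checkGo as_ bs (a_idx + 1) b_idx result
    else
      if as_.getD a_idx ' ' = bs.getD b_idx ' ' then
        checkGo as_ bs (a_idx + 1) (b_idx + 1) (result + 1)
      else
        checkGo as_ bs (a_idx + 1) b_idx result
  else result
termination_by as_.length - a_idx
decreasing_by all_goals omega

def check (a : String) (b : String) : Bool :=
  checkGo a.toList b.toList 0 0 0 == b.toList.length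

-- ===== PORT B =====
-- the loop body of Source B: j starts at len(b)-1 and is decremented on each
-- back-to-front match; b[j] is read only under the guard 0 ≤ j (then in range).
def bStep (bs : List Char) (j : Int) (c : Char) : Int :=
  if 0 ≤ j ∧ c ≠ '_' ∧ bs.getD j.toNat ' ' = c then j - 1 else j

def check_alt (a : String) (b : String) : Bool :=
  decide (a.toList.reverse.foldl (bStep b.toList) ((b.toList.length : Int) - 1) < 0)

-- ===== PRECONDITION & SPEC =====
def Spec_check (a : String) (b : String) (out : Bool) : Prop := out = check_alt a b
instance (a : String) (b : String) (out : Bool) : Decidable (Spec_check a b out) := by unfold Spec_check; infer_instance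

-- ===== CLAIM (what is proved, stated in full; the proofs are below) =====
def Claim_equal_check : Prop := ∀ (a : String) (b : String), Dom_check a b → Spec_check a b (check a b)

-- ===== LEMMAS AND PROOFS =====

-- greedy consumption of a list of available characters, used to characterise A's loop
def consumeB (ch : Char) : List Char → Option (List Char)
  | [] => none
  | c :: rest => if c = ch then some rest else consumeB ch rest

def allInB : List Char → List Char → Bool
  | [], _ => true
  | ch :: bs, it =>
    match consumeB ch it with
    | none => false
    | some rest => allInB bs rest

lemma consumeB_skip (ch c : Char) (it : List Char) (h : c ≠ ch) :
    consumeB ch (c :: it) = consumeB ch it := by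
  simp [consumeB, h]

-- A's loop computes the greedy forward subsequence match
lemma key (as_ bs : List Char) :
    ∀ n a_idx b_idx, n = as_.length - a_idx → b_idx ≤ bs.length →
      (checkGo as_ bs a_idx b_idx b_idx == bs.length)
        = allInB (bs.drop b_idx) ((as_.drop a_idx).filter (fun c => c ≠ '_')) := by
  intro n
  induction n with
  | zero =>
    intro a_idx b_idx hn hb
    have ha : as_.length ≤ a_idx := by omega
    rw [checkGo]
    have : ¬ (b_idx ≠ bs.length ∧ a_idx < as_.length) := by omega
    rw [dif_neg this]
    rw [List.drop_eq_nil_of_le ha]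
    rcases Nat.lt_or_ge b_idx bs.length with hlt | hge
    · have : bs.drop b_idx ≠ [] := by
        simp [List.drop_eq_nil_iff]; omega
      cases hd : bs.drop b_idx with
      | nil => exact absurd hd this
      | cons x xs => simp [allInB, consumeB]; omega
    · have hbe : b_idx = bs.length := le_antisymm hb hge
      rw [List.drop_eq_nil_of_le hge]
      simp [allInB, hbe]
  | succ n ih =>
    intro a_idx b_idx hn hb
    rw [checkGo]
    by_cases hcond : b_idx ≠ bs.length ∧ a_idx < as_.length
    · rw [dif_pos hcond]
      obtain ⟨hbne, halt⟩ := hcond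
      have hblt : b_idx < bs.length := lt_of_le_of_ne hb hbne
      have hdA : as_.drop a_idx = as_[a_idx] :: as_.drop (a_idx + 1) :=
        List.drop_eq_getElem_cons halt
      have hdB : bs.drop b_idx = bs[b_idx] :: bs.drop (b_idx + 1) :=
        List.drop_eq_getElem_cons hblt
      have hga : as_.getD a_idx ' ' = as_[a_idx] := List.getD_eq_getElem _ _ halt
      have hgb : bs.getD b_idx ' ' = bs[b_idx] := List.getD_eq_getElem _ _ hblt
      by_cases hu : as_[a_idx] = '_'
      · rw [if_pos (by rw [hga]; exact hu)]
        rw [ih (a_idx + 1) b_idx (by omega) hb, hdA]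
        simp [hu]
      · rw [if_neg (by rw [hga]; exact hu)]
        by_cases hm : as_[a_idx] = bs[b_idx]
        · rw [if_pos (by rw [hga, hgb]; exact hm)]
          rw [ih (a_idx + 1) (b_idx + 1) (by omega) hblt, hdA, hdB]
          have hbu : ¬ bs[b_idx] = '_' := hm ▸ hu
          simp [hm, hbu, allInB, consumeB]
        · rw [if_neg (by rw [hga, hgb]; exact hm)]
          rw [ih (a_idx + 1) b_idx (by omega) hb, hdA, hdB]
          simp only [List.filter_cons, hu, ne_eq, decide_not]
          cases hf : (as_.drop (a_idx+1)).filter (fun c => decide ¬ c = '_') with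
          | nil =>
            simp [allInB, consumeB_skip _ _ _ hm]
          | cons y ys =>
            simp [allInB, consumeB_skip _ _ _ hm]
    · rw [dif_neg hcond]
      by_cases hbe : b_idx = bs.length
      · rw [List.drop_eq_nil_of_le (le_of_eq hbe.symm)]
        simp [allInB, hbe]
      · have hage : as_.length ≤ a_idx := by
          by_contra h
          exact hcond ⟨hbe, by omega⟩
        rw [List.drop_eq_nil_of_le hage]
        cases hd : bs.drop b_idx with
        | nil => simp [List.drop_eq_nil_iff] at hd; omega
        | cons x xs => simp [allInB, consumeB]; omega

-- the greedy forward match is List.isSublist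
lemma allInB_eq_isSublist : ∀ (it bs : List Char), allInB bs it = bs.isSublist it := by
  intro it
  induction it with
  | nil =>
    intro bs
    cases bs with
    | nil => rfl
    | cons ch bs' => simp [allInB, consumeB, List.isSublist]
  | cons c it' ih =>
    intro bs
    cases bs with
    | nil => rfl
    | cons ch bs' =>
      by_cases h : c = ch
      · subst h
        simp [allInB, consumeB, List.isSublist, ih]
      · have h2 : ch ≠ c := Ne.symm h
        have h' : ¬ (ch == c) = true := by simpa using h2
        calc allInB (ch :: bs') (c :: it')
            = allInB (ch :: bs') it' := by
              simp only [allInB, consumeB_skip _ _ _ h]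
          _ = (ch :: bs').isSublist it' := ih _
          _ = (ch :: bs').isSublist (c :: it') := by
              simp [List.isSublist, h']

-- B's backward fold matches the reversed prefix b[0..j] against a greedily
lemma bfold (bs : List Char) :
    ∀ (l : List Char) (j : Int), -1 ≤ j → j < (bs.length : Int) →
      decide (l.foldl (bStep bs) j < 0)
        = ((bs.take (j + 1).toNat).reverse.isSublist (l.filter (fun c => c ≠ '_'))) := by
  intro l
  induction l with
  | nil =>
    intro j h1 h2
    simp only [List.foldl_nil, List.filter_nil]
    by_cases h0 : j < 0
    · have : j = -1 := by omega
      subst this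
      simp [List.isSublist]
    · have hlen : 0 < bs.length := by omega
      have hne : bs.take (j + 1).toNat ≠ [] := by
        simp [List.take_eq_nil_iff]
        constructor
        · omega
        · intro he; rw [he] at hlen; simp at hlen
      cases hd : (bs.take (j + 1).toNat).reverse with
      | nil => exact absurd (by simpa using hd) hne
      | cons x xs => simp [List.isSublist]; omega
  | cons c l' ih =>
    intro j h1 h2
    simp only [List.foldl_cons]
    by_cases h0 : j < 0
    · have hj : j = -1 := by omega
      subst hj
      have hs : bStep bs (-1) c = -1 := by
        unfold bStep; rw [if_neg]; rintro ⟨hge, -, -⟩; omega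
      simp only [hs]
      rw [ih (-1) (by omega) h2]
      simp [List.isSublist]
    · have hjn : (0:Int) ≤ j := by omega
      have hlt : j.toNat < bs.length := by omega
      have hsucc : (j + 1).toNat = j.toNat + 1 := by omega
      have htake : (bs.take (j + 1).toNat).reverse
          = bs[j.toNat] :: (bs.take j.toNat).reverse := by
        rw [hsucc, List.take_add_one, List.getElem?_eq_getElem hlt]
        simp
      by_cases hc : c = '_'
      · have hs : bStep bs j c = j := by
          unfold bStep; rw [if_neg]; rintro ⟨-, hne, -⟩; exact hne hc
        simp only [hs]
        rw [ih j h1 h2]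
        simp [hc]
      · have hgd : bs.getD j.toNat ' ' = bs[j.toNat] := List.getD_eq_getElem _ _ hlt
        have hfil : (c :: l').filter (fun c => c ≠ '_')
            = c :: l'.filter (fun c => c ≠ '_') := by simp [hc]
        by_cases hm : bs[j.toNat] = c
        · have hs : bStep bs j c = j - 1 := by
            unfold bStep; exact if_pos ⟨hjn, hc, hgd.trans hm⟩
          simp only [hs]
          rw [ih (j - 1) (by omega) (by omega), hfil, htake]
          have : (j - 1 + 1).toNat = j.toNat := by omega
          rw [this]
          simp [List.isSublist, hm]
        · have hs : bStep bs j c = j := by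
            unfold bStep; rw [if_neg]; rintro ⟨-, -, he⟩; exact hm (hgd.symm.trans he)
          simp only [hs]
          rw [ih j h1 h2, hfil, htake]
          have hne : ¬ (bs[j.toNat] == c) = true := by simpa using hm
          simp [List.isSublist, hne]

lemma check_iff (a b : String) :
    check a b = (b.toList.isSublist (a.toList.filter (fun c => c ≠ '_'))) := by
  unfold check
  have := key a.toList b.toList (a.toList.length) 0 0 rfl (Nat.zero_le _)
  simpa [allInB_eq_isSublist] using this

lemma check_alt_iff (a b : String) :
    check_alt a b
      = (b.toList.reverse.isSublist ((a.toList.filter (fun c => c ≠ '_')).reverse)) := by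
  unfold check_alt
  rw [bfold b.toList a.toList.reverse ((b.toList.length : Int) - 1) (by omega)
        (by omega)]
  have h1 : ((b.toList.length : Int) - 1 + 1).toNat = b.toList.length := by omega
  rw [h1, List.take_length, List.filter_reverse]

-- ===== VERDICT (by name: the statement is the Claim_ definition above) =====
theorem check_spec : Claim_equal_check := by
  intro a b _
  unfold Spec_check
  rw [check_iff, check_alt_iff]
  rw [Bool.eq_iff_iff]
  simp only [List.isSublist_iff_sublist]
  exact (List.reverse_sublist).symm
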